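-- pv_equiv track=rewrite | github.com/laichunpongben/CodeJam | 2011/candy_splitting.py | sorted_k_partitions
-- ===== SOURCE A (Python) =====
-- def sorted_k_partitions(seq, k):
--     """Returns a list of all unique k-partitions of `seq`.
--
--     Each partition is a list of parts, and each part is a tuple.
--
--     The parts in each individual partition will be sorted in shortlex
--     order (i.e., by length first, then lexicographically).
--
--     The overall list of partitions will then be sorted by the length
--     of their first part, the length of their second part, ...,
--     the length of their last part, and then lexicographically.
--     """
--     n = len(seq)
--     groups = []  # a list of lists, currently empty
--
--     def generate_partitions(i):
--         if i >= n:
--             yield list(map(tuple, groups))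
--         else:
--             if n - i > k - len(groups):
--                 for group in groups:
--                     group.append(seq[i])
--                     for item in generate_partitions(i + 1):
--                         yield item  # Python3: yield from generate_partitions(i + 1)
--                     group.pop()
--
--             if len(groups) < k:
--                 groups.append([seq[i]])
--                 for item in generate_partitions(i + 1):
--                     yield item  # Python3: yield from generate_partitions(i + 1)
--                 groups.pop()
--
--     result = generate_partitions(0)
--
--     # Sort the parts in each partition in shortlex order
--     result = [sorted(ps, key = lambda p: (len(p), p)) for ps in result]
--     # Sort partitions by the length of each part, then lexicographically.
--     result = sorted(result, key = lambda ps: (len(ps), ps))  # Python3: *map(len, ps)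
--
--     return result
-- ===== SOURCE B (Python) =====
-- def sorted_k_partitions(seq, k):
--     """Same result as A, computed breadth-first: one pass over `seq`
--     maintaining the frontier of all feasible partial partitions."""
--     n = len(seq)
--     frontier = [[]]
--     for i, x in enumerate(seq):
--         rem = n - i
--         new_frontier = []
--         for g in frontier:
--             if rem > k - len(g):
--                 for j in range(len(g)):
--                     new_frontier.append(g[:j] + [g[j] + [x]] + g[j+1:])
--             if len(g) < k:
--                 new_frontier.append(g + [[x]])
--         frontier = new_frontier
--     result = [sorted((tuple(p) for p in g), key=lambda p: (len(p), p)) for g in frontier]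
--     result.sort(key=lambda ps: (len(ps), ps))
--     return result
-- ===== Notes on version B (the rewrite author's own statement) =====
-- stated objective: alternative
-- what changed: A's depth-first recursive generator threading a mutable `groups` accumulator is replaced by a single breadth-first pass over the elements that maintains the list of all feasible partial partitions (a frontier expanded level by level); the final two sorts are unchanged.
import Mathlib
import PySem

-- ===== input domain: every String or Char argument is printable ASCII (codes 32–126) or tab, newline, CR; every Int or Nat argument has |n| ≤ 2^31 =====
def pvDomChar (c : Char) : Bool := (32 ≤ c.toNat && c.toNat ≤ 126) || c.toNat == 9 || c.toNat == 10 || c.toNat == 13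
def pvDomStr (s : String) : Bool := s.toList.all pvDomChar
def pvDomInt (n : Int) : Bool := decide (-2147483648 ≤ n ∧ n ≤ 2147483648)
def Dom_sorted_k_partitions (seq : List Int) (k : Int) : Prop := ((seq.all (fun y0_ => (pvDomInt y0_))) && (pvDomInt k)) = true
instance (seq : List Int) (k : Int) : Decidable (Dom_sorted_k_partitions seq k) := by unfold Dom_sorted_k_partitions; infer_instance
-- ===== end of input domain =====

-- B replaces A's depth-first generator recursion by a single breadth-first pass that
-- maintains the frontier of all feasible partial partitions (objective: alternative).

-- ===== PORT A =====
-- 'for group in groups: group.append(x); <recurse>; group.pop()' — the list of states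
-- the mutated `groups` takes across the loop, in loop order (x joined to each group in turn).
def pvA_join (x : Int) : List (List Int) → List (List (List Int))
  | [] => []
  | g :: gs => ((g ++ [x]) :: gs) :: (pvA_join x gs).map (g :: ·)

-- generate_partitions(i): `rest` is seq[i:], so n - i = rest.length; groups threaded explicitly.
def pvA_gen (k : Int) : List Int → List (List Int) → List (List (List Int))
  | [], groups => [groups]
  | x :: rest, groups =>
      (if ((rest.length : Int) + 1 > k - (groups.length : Int)) then
         (pvA_join x groups).flatMap (fun gs => pvA_gen k rest gs)
       else []) ++
      (if ((groups.length : Int) < k) then pvA_gen k rest (groups ++ [[x]]) else [])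
  termination_by rest => rest.length

def sorted_k_partitions (seq : List Int) (k : Int) : List (List (List Int)) :=
  let result := pvA_gen k seq []
  let result := result.map (fun ps => PySem.List.sorted2 ps (fun p => (p.length : Int)) (fun p => p) false)
  PySem.List.sorted2 result (fun ps => (ps.length : Int)) (fun ps => ps) false

-- ===== PORT B =====
-- successors of one partial partition g for element x (`rem` elements remain, x included):
-- g[:j] + [g[j] + [x]] + g[j+1:] for each j (take/drop are exact for 0 ≤ j < len(g)), then g + [[x]].
def pvB_step (k : Int) (rem : Int) (x : Int) (g : List (List Int)) : List (List (List Int)) :=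
  (if rem > k - (g.length : Int) then
     (List.range g.length).map (fun j => g.take j ++ ((g.drop j).headD [] ++ [x]) :: g.drop (j + 1))
   else []) ++
  (if ((g.length : Int) < k) then [g ++ [[x]]] else [])

-- the frontier loop: 'for i, x in enumerate(seq): …' with rem = n - i = rest.length + 1
def pvB_run (k : Int) : List Int → List (List (List Int)) → List (List (List Int))
  | [], fr => fr
  | x :: rest, fr => pvB_run k rest (fr.flatMap (pvB_step k ((rest.length : Int) + 1) x))

def sorted_k_partitions_alt (seq : List Int) (k : Int) : List (List (List Int)) :=
  let frontier := pvB_run k seq [[]]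
  PySem.List.sorted2
    (frontier.map (fun g => PySem.List.sorted2 g (fun p => (p.length : Int)) (fun p => p) false))
    (fun ps => (ps.length : Int)) (fun ps => ps) false

-- ===== PRECONDITION & SPEC =====
def Spec_sorted_k_partitions (seq : List Int) (k : Int) (out : List (List (List Int))) : Prop := out = sorted_k_partitions_alt seq k
instance (seq : List Int) (k : Int) (out : List (List (List Int))) : Decidable (Spec_sorted_k_partitions seq k out) := by unfold Spec_sorted_k_partitions; infer_instance

-- ===== CLAIM (what is proved, stated in full; the proofs are below) =====
def Claim_equal_sorted_k_partitions : Prop := ∀ (seq : List Int) (k : Int), Dom_sorted_k_partitions seq k → Spec_sorted_k_partitions seq k (sorted_k_partitions seq k)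

-- ===== LEMMAS AND PROOFS =====

-- B's index-sliced successor list is exactly A's join-each-group-in-turn list.
theorem pvB_join_eq (x : Int) (g : List (List Int)) :
    (List.range g.length).map (fun j => g.take j ++ ((g.drop j).headD [] ++ [x]) :: g.drop (j + 1))
      = pvA_join x g := by
  induction g with
  | nil => simp [pvA_join]
  | cons h t ih =>
      simp only [pvA_join, List.length_cons, List.range_succ_eq_map, List.map_cons, List.map_map]
      rw [← ih]
      simp [Function.comp, List.map_map]

-- one element of A's recursion = B's step expanded then A continued.
theorem pvA_gen_cons (k x : Int) (rest : List Int) (g : List (List Int)) :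
    pvA_gen k (x :: rest) g
      = (pvB_step k ((rest.length : Int) + 1) x g).flatMap (fun gs => pvA_gen k rest gs) := by
  rw [pvA_gen, pvB_step, ← pvB_join_eq]
  split_ifs with h1 h2 <;> simp [List.flatMap_append]

-- the frontier pass continues every frontier member the way A's recursion does.
theorem pvB_run_eq (k : Int) (rest : List Int) :
    ∀ fr : List (List (List Int)), pvB_run k rest fr = fr.flatMap (fun g => pvA_gen k rest g) := by
  induction rest with
  | nil => intro fr; simp [pvB_run, pvA_gen]
  | cons x rest ih =>
      intro fr
      rw [pvB_run, ih, List.flatMap_assoc]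
      exact List.flatMap_congr (fun g _ => (pvA_gen_cons k x rest g).symm)

-- ===== VERDICT (by name: the statement is the Claim_ definition above) =====
theorem sorted_k_partitions_spec : Claim_equal_sorted_k_partitions := by
  intro seq k _
  unfold Spec_sorted_k_partitions sorted_k_partitions sorted_k_partitions_alt
  rw [pvB_run_eq]
  simp
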